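-- pv_equiv track=rewrite | github.com/vijaikrish/blade_sorting | Genetic_algorithm_example.py | get_current_neighbour
-- ===== SOURCE A (Python) =====
-- def get_current_neighbour(nodes, neighbour_lists):
--     neighbours = []
--
--     if nodes is not None:
--         for node in nodes[1]:
--             for neighbour in neighbour_lists:
--                 if node == neighbour[0]:
--                     neighbours.append(neighbour)
--
--     return neighbours
-- ===== SOURCE B (Python) =====
-- def _build_index(neighbour_lists):
--     index = {}
--     for nb in neighbour_lists:
--         index.setdefault(nb[0], []).append(nb)
--     return index
--
--
-- def get_current_neighbour(nodes, neighbour_lists):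
--     if nodes is None:
--         return []
--     targets = nodes[1]
--     if not targets:
--         return []
--     index = _build_index(neighbour_lists)
--     return [nb for t in targets for nb in index.get(t, [])]
-- ===== Notes on version B (the rewrite author's own statement) =====
-- stated objective: alternative
-- what changed: B builds a dict grouping neighbour lists by their first element in one pass and then concatenates the per-node buckets with a comprehension, replacing A's inner scan of neighbour_lists for every node; the timing inputs are output-dominated, so no speed-up was measured.
import Mathlib
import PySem

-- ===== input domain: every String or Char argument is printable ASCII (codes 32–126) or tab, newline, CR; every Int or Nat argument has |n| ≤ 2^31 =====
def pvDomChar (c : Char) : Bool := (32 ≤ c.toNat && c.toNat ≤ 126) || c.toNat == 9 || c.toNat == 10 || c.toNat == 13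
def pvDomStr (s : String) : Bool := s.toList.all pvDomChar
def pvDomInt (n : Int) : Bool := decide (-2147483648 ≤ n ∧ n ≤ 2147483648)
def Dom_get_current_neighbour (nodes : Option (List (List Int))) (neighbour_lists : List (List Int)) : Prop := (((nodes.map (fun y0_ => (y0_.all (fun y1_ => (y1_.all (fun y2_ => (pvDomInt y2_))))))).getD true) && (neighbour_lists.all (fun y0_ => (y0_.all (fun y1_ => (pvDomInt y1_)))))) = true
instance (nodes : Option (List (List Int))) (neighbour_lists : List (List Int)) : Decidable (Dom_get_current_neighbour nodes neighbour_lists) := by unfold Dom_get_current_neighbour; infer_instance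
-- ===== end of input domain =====

-- B groups neighbour lists by first element into a dict (built by a recursive helper) and
-- flat-maps the per-node buckets, replacing A's inner scan of neighbour_lists per node
-- (alternative algorithm; no speed-up measured on the output-dominated timing inputs).


-- ===== PORT A =====
-- nodes[1] and neighbour[0] via pyGet?; the `none` branches are IndexError sites, excluded by Pre_.
def get_current_neighbour (nodes : Option (List (List Int))) (neighbour_lists : List (List Int)) : List (List Int) :=
  match nodes with
  | none => []
  | some l =>
    match PySem.List.pyGet? l 1 with
    | none => []  -- IndexError in Python; outside Pre_
    | some targets =>
      targets.foldl (fun acc node =>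
        neighbour_lists.foldl (fun acc2 nb =>
          match PySem.List.pyGet? nb 0 with
          | none => acc2  -- IndexError in Python; outside Pre_
          | some h => if node == h then acc2 ++ [nb] else acc2) acc) []

-- ===== PORT B =====
-- B's helper _build_index: a recursive pass over neighbour_lists grouping by nb[0].
def pvBuildIndex : PySem.Dict Int (List (List Int)) → List (List Int) → PySem.Dict Int (List (List Int))
  | d, [] => d
  | d, nb :: rest =>
    match PySem.List.pyGet? nb 0 with
    | none => pvBuildIndex d rest  -- IndexError in Python; outside Pre_
    | some h => pvBuildIndex (d.modify h [] (· ++ [nb])) rest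

def get_current_neighbour_alt (nodes : Option (List (List Int))) (neighbour_lists : List (List Int)) : List (List Int) :=
  match nodes with
  | none => []
  | some l =>
    match PySem.List.pyGet? l 1 with
    | none => []  -- IndexError in Python; outside Pre_
    | some targets =>
      if targets.isEmpty then []
      else
        let index := pvBuildIndex PySem.Dict.empty neighbour_lists
        targets.flatMap (fun t => index.getD t [])

-- ===== PRECONDITION & SPEC =====
-- Pre_ excludes exactly the inputs where Python A raises IndexError: a non-None nodes with
-- fewer than 2 entries (nodes[1]), and a nonempty nodes[1] together with an empty neighbour
-- list (neighbour[0]).  B raises on exactly the same inputs.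
def Pre_get_current_neighbour (nodes : Option (List (List Int))) (neighbour_lists : List (List Int)) : Prop :=
  (match nodes with
   | none => true
   | some l => decide (2 ≤ l.length) &&
       decide (l.getD 1 [] ≠ [] → ∀ nb ∈ neighbour_lists, nb ≠ [])) = true
instance (nodes : Option (List (List Int))) (neighbour_lists : List (List Int)) : Decidable (Pre_get_current_neighbour nodes neighbour_lists) := by unfold Pre_get_current_neighbour; infer_instance

def pvWitness_get_current_neighbour : Option (List (List Int)) × List (List Int) :=
  (some [[0], [1, 2]], [[1, 5], [2, 7], [3], [1]])

def Spec_get_current_neighbour (nodes : Option (List (List Int))) (neighbour_lists : List (List Int)) (out : List (List Int)) : Prop := out = get_current_neighbour_alt nodes neighbour_lists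
instance (nodes : Option (List (List Int))) (neighbour_lists : List (List Int)) (out : List (List Int)) : Decidable (Spec_get_current_neighbour nodes neighbour_lists out) := by unfold Spec_get_current_neighbour; infer_instance

-- ===== CLAIM (what is proved, stated in full; the proofs are below) =====
def Claim_equal_get_current_neighbour : Prop := ∀ (nodes : Option (List (List Int))) (neighbour_lists : List (List Int)), Dom_get_current_neighbour nodes neighbour_lists → Pre_get_current_neighbour nodes neighbour_lists → Spec_get_current_neighbour nodes neighbour_lists (get_current_neighbour nodes neighbour_lists)

-- ===== LEMMAS AND PROOFS =====

-- B's recursive index build is the left fold over neighbour_lists.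
theorem pvBuildIndex_eq_foldl (l : List (List Int)) (d : PySem.Dict Int (List (List Int))) :
    pvBuildIndex d l = l.foldl (fun d nb =>
      match PySem.List.pyGet? nb 0 with
      | none => d
      | some h => d.modify h [] (· ++ [nb])) d := by
  induction l generalizing d with
  | nil => rfl
  | cons nb rest ih =>
    simp only [pvBuildIndex, List.foldl_cons]
    cases PySem.List.pyGet? nb 0 <;> simp [ih]

-- The index hands back, for each key t, exactly the neighbours whose head is t, in order.
theorem pv_index_getD (nls : List (List Int)) (t : Int)
    (hne : ∀ nb ∈ nls, nb ≠ []) :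
    (pvBuildIndex PySem.Dict.empty nls).getD t []
      = nls.filter (fun nb => nb.headD 0 == t) := by
  rw [pvBuildIndex_eq_foldl]
  have hcongr : nls.foldl (fun d nb =>
      match PySem.List.pyGet? nb 0 with
      | none => d
      | some h => d.modify h [] (· ++ [nb])) PySem.Dict.empty
      = nls.foldl (fun d nb => d.modify (nb.headD 0) [] (· ++ [nb])) PySem.Dict.empty := by
    apply PySem.List.foldl_congr_mem
    intro d nb hnb
    rcases List.exists_cons_of_ne_nil (hne nb hnb) with ⟨x, xs, rfl⟩
    simp [PySem.List.pyGet?, PySem.List.pyIdx?]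
  rw [hcongr]
  have hmap : nls.foldl (fun d nb => d.modify (nb.headD 0) [] (· ++ [nb])) PySem.Dict.empty
      = (nls.map (fun nb => ((nb.headD 0 : Int), nb))).foldl
          (fun d p => d.modify p.1 [] (· ++ [p.2])) PySem.Dict.empty := by
    rw [List.foldl_map]
  rw [hmap, PySem.Dict.getD_foldl_modify_append]
  simp [List.filter_map, Function.comp_def]

theorem get_current_neighbour_spec : Claim_equal_get_current_neighbour := by
  intro nodes nls _ hpre
  unfold Spec_get_current_neighbour get_current_neighbour get_current_neighbour_alt
  cases nodes with
  | none => rfl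
  | some l =>
    simp only [Pre_get_current_neighbour, Bool.and_eq_true, decide_eq_true_eq] at hpre
    obtain ⟨hlen, hnb⟩ := hpre
    cases hget : PySem.List.pyGet? l 1 with
    | none => simp only [hget]
    | some targets =>
      simp only [hget]
      by_cases hte : targets.isEmpty
      · rw [List.isEmpty_iff] at hte
        subst hte
        simp
      · simp only [hte, if_neg, Bool.false_eq_true, not_false_eq_true]
        have htargets : targets = l.getD 1 [] := by
          have h1 : (1:Int) = ((1:Nat):Int) := rfl
          rw [h1, PySem.List.pyGet?_natCast] at hget
          simp [hget]
        have hne : ∀ nb ∈ nls, nb ≠ [] := by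
          rw [List.isEmpty_iff] at hte
          exact hnb (htargets ▸ hte)
        -- A's inner loop, per node, appends to the accumulator the neighbours headed by that node
        have hinner : ∀ (node : Int) (acc : List (List Int)),
            nls.foldl (fun acc2 nb =>
              match PySem.List.pyGet? nb 0 with
              | none => acc2
              | some h => if node == h then acc2 ++ [nb] else acc2) acc
            = acc ++ nls.filter (fun nb => nb.headD 0 == node) := by
          intro node acc
          have hc : nls.foldl (fun acc2 nb =>
              match PySem.List.pyGet? nb 0 with
              | none => acc2
              | some h => if node == h then acc2 ++ [nb] else acc2) acc
              = nls.foldl (fun acc2 nb =>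
                  if nb.headD 0 == node then acc2 ++ [nb] else acc2) acc := by
            apply PySem.List.foldl_congr_mem
            intro acc2 nb hmem
            rcases List.exists_cons_of_ne_nil (hne nb hmem) with ⟨x, xs, rfl⟩
            simp [PySem.List.pyGet?, PySem.List.pyIdx?, BEq.comm]
          rw [hc, PySem.List.foldl_append_if_eq_filter]
        calc targets.foldl (fun acc node =>
              nls.foldl (fun acc2 nb =>
                match PySem.List.pyGet? nb 0 with
                | none => acc2
                | some h => if node == h then acc2 ++ [nb] else acc2) acc) []
            = targets.foldl (fun acc node =>
                acc ++ nls.filter (fun nb => nb.headD 0 == node)) [] := by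
              apply PySem.List.foldl_congr_mem
              intro acc node _
              exact hinner node acc
          _ = targets.flatMap (fun node => nls.filter (fun nb => nb.headD 0 == node)) := by
              rw [PySem.List.foldl_append_eq_flatMap]; rfl
          _ = targets.flatMap (fun t => (pvBuildIndex PySem.Dict.empty nls).getD t []) := by
              have hfun : (fun node => nls.filter (fun nb => nb.headD 0 == node))
                  = (fun t => (pvBuildIndex PySem.Dict.empty nls).getD t []) := by
                funext t
                rw [pv_index_getD nls t hne]
              rw [hfun]
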